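-- pv_equiv track=rewrite | github.com/tpdox/flipper-zero-urban-sorcerer | deploy.py | collect_required_dirs
-- ===== SOURCE A (Python) =====
-- FLIPPER_DIRS = [
--     "/ext/infrared",
--     "/ext/badusb",
--     "/ext/nfc",
--     "/ext/nfc/amiibo",
--     "/ext/subghz",
--     "/ext/apps_data/music_player",
--     "/ext/apps/NFC",
--     "/ext/apps/Sub-GHz",
--     "/ext/apps/Infrared",
--     "/ext/apps/Media",
--     "/ext/apps/USB",
-- ]
--
-- def collect_required_dirs(uploads):
--     """Determine which directories need to be created on the Flipper.
--
--     Starts with the base FLIPPER_DIRS list, then adds any extra parent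
--     directories implied by the upload file list (e.g., amiibo subdirs).
--
--     Returns:
--         list[str]: Sorted list of unique directory paths to create.
--     """
--     dirs = set(FLIPPER_DIRS)
--
--     for _local, remote in uploads:
--         # Add the parent directory of every file we'll upload
--         parent = remote.rsplit("/", 1)[0]
--         while parent and parent != "/ext":
--             dirs.add(parent)
--             parent = parent.rsplit("/", 1)[0] if "/" in parent[1:] else ""
--
--     return sorted(dirs)
-- ===== SOURCE B (Python) =====
-- FLIPPER_DIRS = [
--     "/ext/infrared",
--     "/ext/badusb",
--     "/ext/nfc",
--     "/ext/nfc/amiibo",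
--     "/ext/subghz",
--     "/ext/apps_data/music_player",
--     "/ext/apps/NFC",
--     "/ext/apps/Sub-GHz",
--     "/ext/apps/Infrared",
--     "/ext/apps/Media",
--     "/ext/apps/USB",
-- ]
--
-- def collect_required_dirs(uploads):
--     """Component-based rewrite: split the parent path into components and add
--     every '/'-joined prefix that is neither empty nor '/ext'."""
--     dirs = set(FLIPPER_DIRS)
--     for _local, remote in uploads:
--         parts = remote.rsplit("/", 1)[0].split("/")
--         for k in range(len(parts), 0, -1):
--             prefix = "/".join(parts[:k])
--             if prefix and prefix != "/ext":
--                 dirs.add(prefix)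
--     return sorted(dirs)
-- ===== Notes on version B (the rewrite author's own statement) =====
-- stated objective: alternative
-- what changed: Replaced A's bottom-up while-loop that repeatedly rsplits the parent path by a single forward scan that splits the path into components, accumulates every '/'-joined ancestor prefix in one pass, and then filter-adds the reversed prefix list (skipping '' and '/ext').
import Mathlib
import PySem

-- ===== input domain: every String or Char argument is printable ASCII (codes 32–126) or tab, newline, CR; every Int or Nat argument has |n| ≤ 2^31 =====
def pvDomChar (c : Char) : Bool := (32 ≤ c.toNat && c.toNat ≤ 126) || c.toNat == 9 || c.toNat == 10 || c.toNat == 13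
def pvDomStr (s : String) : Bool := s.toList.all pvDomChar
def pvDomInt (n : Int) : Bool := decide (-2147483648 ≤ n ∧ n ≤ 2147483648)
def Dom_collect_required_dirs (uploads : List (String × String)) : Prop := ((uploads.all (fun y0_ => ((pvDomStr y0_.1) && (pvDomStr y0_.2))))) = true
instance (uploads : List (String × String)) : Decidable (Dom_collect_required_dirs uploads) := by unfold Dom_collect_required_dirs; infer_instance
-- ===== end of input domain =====

-- B replaces A's bottom-up while-loop of repeated rsplit by one forward scan that
-- builds all '/'-joined ancestor prefixes and filters them (objective: alternative decomposition).

-- ===== PORT A =====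

def pvFlipperDirs : List String :=
  ["/ext/infrared", "/ext/badusb", "/ext/nfc", "/ext/nfc/amiibo", "/ext/subghz",
   "/ext/apps_data/music_player", "/ext/apps/NFC", "/ext/apps/Sub-GHz",
   "/ext/apps/Infrared", "/ext/apps/Media", "/ext/apps/USB"]

-- s.rsplit("/", 1)[0], ported by hand (exact): the characters strictly before the
-- LAST '/', or the whole string when it has no '/'.
def pvRsplitHead (cs : List Char) : List Char :=
  if cs.contains '/' then (((cs.reverse).dropWhile (fun c => c ≠ '/')).drop 1).reverse else cs

-- termination helper for the while-loop port (cited by decreasing_by)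
theorem pvRsplitHead_length_lt (cs : List Char) (h : '/' ∈ cs) :
    (pvRsplitHead cs).length < cs.length := by
  have hc : cs.contains '/' = true := by simpa using h
  have hne : (cs.reverse).dropWhile (fun c => decide (c ≠ '/')) ≠ [] := by
    simp only [ne_eq, List.dropWhile_eq_nil_iff]
    intro hall
    have := hall '/' (by simpa using h)
    simp at this
  have hle : ((cs.reverse).dropWhile (fun c => decide (c ≠ '/'))).length ≤ cs.length := by
    calc ((cs.reverse).dropWhile (fun c => decide (c ≠ '/'))).length
        ≤ cs.reverse.length := List.length_dropWhile_le _ _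
      _ = cs.length := List.length_reverse
  have hpos : 0 < ((cs.reverse).dropWhile (fun c => decide (c ≠ '/'))).length :=
    List.length_pos_iff.mpr hne
  have hcs : 0 < cs.length := List.length_pos_iff.mpr (by rintro rfl; simp at h)
  simp only [pvRsplitHead, hc, if_pos]
  simp only [List.length_reverse, List.length_drop]
  omega

-- A's while-loop: while parent and parent != "/ext": dirs.add(parent); parent = …
def pvAWhile (dirs : PySem.Set String) (parent : List Char) : PySem.Set String :=
  if hc : parent ≠ [] ∧ parent ≠ ['/', 'e', 'x', 't'] then
    pvAWhile (PySem.Set.add dirs (String.ofList parent))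
      (if '/' ∈ parent.drop 1 then pvRsplitHead parent else [])
  else dirs
termination_by parent.length
decreasing_by
  split
  · exact pvRsplitHead_length_lt parent (List.mem_of_mem_drop (by assumption))
  · have : parent ≠ [] := hc.1
    simpa [List.length_pos_iff] using this

def collect_required_dirs (uploads : List (String × String)) : List String :=
  PySem.List.sorted
    (uploads.foldl (fun dirs lr => pvAWhile dirs (pvRsplitHead lr.2.toList))
      (PySem.Set.ofList pvFlipperDirs))
    (fun x => x) false

-- ===== PORT B =====

-- the forward scan: acc = part if acc is None else acc + "/" + part; prefixes.append(acc)
def pvScanPrefixes (parts : List (List Char)) : Option (List Char) × List (List Char) :=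
  parts.foldl
    (fun st part =>
      let acc := match st.1 with
        | none => part
        | some a => a ++ '/' :: part
      (some acc, st.2 ++ [acc]))
    (none, [])

def pvBAdd (dirs : PySem.Set String) (remote : String) : PySem.Set String :=
  let parts := PySem.Chars.splitOn (pvRsplitHead remote.toList) ['/']
  let prefixes := (pvScanPrefixes parts).2
  prefixes.reverse.foldl
    (fun d pre =>
      if pre ≠ [] ∧ pre ≠ ['/', 'e', 'x', 't'] then PySem.Set.add d (String.ofList pre) else d)
    dirs

def collect_required_dirs_alt (uploads : List (String × String)) : List String :=
  PySem.List.sorted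
    (uploads.foldl (fun dirs lr => pvBAdd dirs lr.2) (PySem.Set.ofList pvFlipperDirs))
    (fun x => x) false

-- ===== PRECONDITION & SPEC =====
def Spec_collect_required_dirs (uploads : List (String × String)) (out : List String) : Prop := out = collect_required_dirs_alt uploads
instance (uploads : List (String × String)) (out : List String) : Decidable (Spec_collect_required_dirs uploads out) := by unfold Spec_collect_required_dirs; infer_instance

-- ===== CLAIM (what is proved, stated in full; the proofs are below) =====
def Claim_equal_collect_required_dirs : Prop := ∀ (uploads : List (String × String)), Dom_collect_required_dirs uploads → Spec_collect_required_dirs uploads (collect_required_dirs uploads)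

-- ===== LEMMAS AND PROOFS =====

-- a simple structural model of s.split("/")
def pvSplit : List Char → List (List Char)
  | [] => [[]]
  | c :: r => if c = '/' then [] :: pvSplit r else (pvSplit r).modifyHead (c :: ·)

theorem pvSplit_ne_nil (l : List Char) : pvSplit l ≠ [] := by
  induction l with
  | nil => simp [pvSplit]
  | cons c r ih =>
    simp only [pvSplit]
    split
    · simp
    · cases h : pvSplit r with
      | nil => exact absurd h ih
      | cons a t => simp [List.modifyHead]

theorem pvSplit_slashfree (l : List Char) : ∀ p ∈ pvSplit l, '/' ∉ p := by
  induction l with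
  | nil => intro p hp; simp [pvSplit] at hp; simp [hp]
  | cons c r ih =>
    intro p hp
    simp only [pvSplit] at hp
    by_cases hc : c = '/'
    · simp [hc] at hp
      rcases hp with rfl | hp
      · simp
      · exact ih p hp
    · rw [if_neg hc] at hp
      cases h : pvSplit r with
      | nil => exact absurd h (pvSplit_ne_nil r)
      | cons a t =>
        rw [h, List.modifyHead] at hp
        obtain hpe | hpm := List.mem_cons.mp hp
        · rw [hpe]
          intro hmem
          obtain h1 | h1 := List.mem_cons.mp hmem
          · exact hc h1.symm
          · exact ih a (h ▸ List.mem_cons_self) h1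
        · exact ih p (h ▸ List.mem_cons_of_mem a hpm)

theorem pvSplit_join (l : List Char) : PySem.Chars.join ['/'] (pvSplit l) = l := by
  induction l with
  | nil => simp [pvSplit, PySem.Chars.join_singleton]
  | cons c r ih =>
    simp only [pvSplit]
    by_cases hc : c = '/'
    · subst hc
      rw [if_pos rfl]
      cases h : pvSplit r with
      | nil => exact absurd h (pvSplit_ne_nil r)
      | cons a t =>
        rw [PySem.Chars.join_cons_cons]
        rw [h] at ih
        simp [ih]
    · rw [if_neg hc]
      cases h : pvSplit r with
      | nil => exact absurd h (pvSplit_ne_nil r)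
      | cons a t =>
        rw [h] at ih
        cases t with
        | nil =>
          simp only [List.modifyHead, PySem.Chars.join_singleton] at *
          rw [ih]
        | cons b t' =>
          simp only [List.modifyHead, PySem.Chars.join_cons_cons] at *
          simp [ih]

-- bridge: PySem's fueled splitter agrees with the structural model for sep = "/"
theorem pvSplitOnGo_eq : ∀ (fuel : Nat) (l cur : List Char) (acc : List (List Char)),
    l.length ≤ fuel →
    PySem.Chars.splitOn.go ['/'] fuel l cur acc =
      acc.reverse ++ (pvSplit l).modifyHead (cur.reverse ++ ·) := by
  intro fuel
  induction fuel with
  | zero =>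
    intro l cur acc hl
    have : l = [] := List.eq_nil_of_length_eq_zero (Nat.le_zero.mp hl)
    subst this
    simp [PySem.Chars.splitOn.go, pvSplit, List.modifyHead]
  | succ n ih =>
    intro l cur acc hl
    cases l with
    | nil => simp [PySem.Chars.splitOn.go, pvSplit, List.modifyHead]
    | cons c rest =>
      simp only [PySem.Chars.splitOn.go]
      have hr : rest.length ≤ n := by simp only [List.length_cons] at hl; omega
      by_cases hc : c = '/'
      · subst hc
        rw [if_pos (by simp [List.isPrefixOf])]
        have hgo := ih rest [] (cur.reverse :: acc) hr
        cases h : pvSplit rest with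
        | nil => exact absurd h (pvSplit_ne_nil rest)
        | cons a t =>
          rw [h] at hgo
          simp only [List.modifyHead, List.reverse_nil, List.nil_append] at hgo
          simp only [List.length_cons, List.length_nil, List.drop_succ_cons, List.drop_zero]
          rw [hgo]
          simp [pvSplit, List.modifyHead, h]
      · rw [if_neg (by simp [List.isPrefixOf]; exact fun h => hc h.symm)]
        rw [ih rest (c :: cur) acc hr]
        simp only [pvSplit, if_neg hc]
        cases h : pvSplit rest with
        | nil => exact absurd h (pvSplit_ne_nil rest)
        | cons a t => simp [List.modifyHead]

theorem pvSplitOn_eq (cs : List Char) :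
    PySem.Chars.splitOn cs ['/'] = pvSplit cs := by
  unfold PySem.Chars.splitOn
  rw [pvSplitOnGo_eq (cs.length + 1) cs [] [] (by omega)]
  cases h : pvSplit cs with
  | nil => exact absurd h (pvSplit_ne_nil cs)
  | cons a t => simp [List.modifyHead]

theorem pvJoin_append_singleton (ps : List (List Char)) (q : List Char) (h : ps ≠ []) :
    PySem.Chars.join ['/'] (ps ++ [q]) = PySem.Chars.join ['/'] ps ++ '/' :: q := by
  induction ps with
  | nil => exact absurd rfl h
  | cons a ps' ih =>
    cases ps' with
    | nil => simp [PySem.Chars.join_cons_cons, PySem.Chars.join_singleton]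
    | cons b t =>
      have := ih (by simp)
      simp only [List.cons_append, PySem.Chars.join_cons_cons] at *
      simp [this]

theorem pvJoin_eq_nil (ps : List (List Char)) (hne : ps ≠ [])
    (h : PySem.Chars.join ['/'] ps = []) : ps = [[]] := by
  cases ps with
  | nil => exact absurd rfl hne
  | cons a t =>
    cases t with
    | nil =>
      rw [PySem.Chars.join_singleton] at h
      simp [h]
    | cons b t' =>
      rw [PySem.Chars.join_cons_cons] at h
      simp at h

-- the scan accumulator after a nonempty list of parts is the join of the parts
theorem pvScanPrefixes_fst (ps : List (List Char)) (h : ps ≠ []) :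
    (pvScanPrefixes ps).1 = some (PySem.Chars.join ['/'] ps) := by
  induction ps using List.reverseRecOn with
  | nil => exact absurd rfl h
  | append_singleton ps' q ih =>
    cases hps' : ps' with
    | nil => subst hps'; simp [pvScanPrefixes, PySem.Chars.join_singleton]
    | cons a t =>
      rw [← hps']
      have hne : ps' ≠ [] := by simp [hps']
      unfold pvScanPrefixes at *
      rw [List.foldl_append]
      simp only [List.foldl_cons, List.foldl_nil]
      rw [ih hne, pvJoin_append_singleton ps' q hne]

theorem pvScanPrefixes_snoc (ps : List (List Char)) (q : List Char) (h : ps ≠ []) :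
    (pvScanPrefixes (ps ++ [q])).2 =
      (pvScanPrefixes ps).2 ++ [PySem.Chars.join ['/'] (ps ++ [q])] := by
  unfold pvScanPrefixes
  rw [List.foldl_append]
  simp only [List.foldl_cons, List.foldl_nil]
  have h1 := pvScanPrefixes_fst ps h
  unfold pvScanPrefixes at h1
  rw [h1, pvJoin_append_singleton ps q h]

theorem pvScanPrefixes_single (q : List Char) : pvScanPrefixes [q] = (some q, [q]) := by
  simp [pvScanPrefixes]

-- the B-side inner fold (filter-add over the reversed prefixes)
def pvBFold (prefixes : List (List Char)) (dirs : PySem.Set String) : PySem.Set String :=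
  prefixes.foldl
    (fun d pre =>
      if pre ≠ [] ∧ pre ≠ ['/', 'e', 'x', 't'] then PySem.Set.add d (String.ofList pre) else d)
    dirs

-- MAIN per-remote lemma: A's while-loop equals B's reversed-prefix fold
theorem pvChain (parts : List (List Char)) (hsf : ∀ p ∈ parts, '/' ∉ p) (hne : parts ≠ []) :
    ∀ d, pvAWhile d (PySem.Chars.join ['/'] parts) =
      pvBFold ((pvScanPrefixes parts).2).reverse d := by
  induction parts using List.reverseRecOn with
  | nil => exact absurd rfl hne
  | append_singleton ps q ih =>
    intro d
    cases hps : ps with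
    | nil =>
      -- parts = [q]
      subst hps
      simp only [List.nil_append, PySem.Chars.join_singleton, pvScanPrefixes_single]
      rw [pvAWhile]
      by_cases hcond : q ≠ [] ∧ q ≠ ['/', 'e', 'x', 't']
      · rw [dif_pos hcond]
        have hq : '/' ∉ q := hsf q (by simp)
        have : '/' ∉ q.drop 1 := fun hmem => hq (List.mem_of_mem_drop hmem)
        rw [if_neg this, pvAWhile]
        simp [pvBFold, hcond]
      · rw [dif_neg hcond]
        simp only [pvBFold, List.reverse_cons, List.reverse_nil, List.nil_append,
          List.foldl_cons, List.foldl_nil]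
        rw [if_neg hcond]
    | cons a t =>
      rw [← hps]
      have hpsne : ps ≠ [] := by simp [hps]
      have hq : '/' ∉ q := hsf q (by simp)
      have hsf' : ∀ p ∈ ps, '/' ∉ p := fun p hp => hsf p (List.mem_append_left _ hp)
      have hPJ : PySem.Chars.join ['/'] (ps ++ [q]) = PySem.Chars.join ['/'] ps ++ '/' :: q :=
        pvJoin_append_singleton ps q hpsne
      rw [hPJ, pvScanPrefixes_snoc ps q hpsne, hPJ]
      rw [List.reverse_append, List.reverse_singleton]
      simp only [List.singleton_append]
      have hPne : PySem.Chars.join ['/'] ps ++ '/' :: q ≠ [] := by simp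
      by_cases hext : PySem.Chars.join ['/'] ps ++ '/' :: q = ['/', 'e', 'x', 't']
      · -- parent is "/ext": A stops; B filters out "/ext" and then the lone empty prefix
        have hLnil : PySem.Chars.join ['/'] ps = [] := by
          cases hLcase : PySem.Chars.join ['/'] ps with
          | nil => rfl
          | cons c L' =>
            rw [hLcase] at hext
            simp only [List.cons_append] at hext
            have h2 : L' ++ '/' :: q = ['e', 'x', 't'] := by injection hext with _ h2
            have : '/' ∈ L' ++ '/' :: q := List.mem_append_right _ (List.mem_cons_self)
            rw [h2] at this
            simp at this
        have hps1 : ps = [[]] := pvJoin_eq_nil ps hpsne hLnil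
        rw [pvAWhile, dif_neg (by simp [hext])]
        simp only [pvBFold, List.foldl_cons]
        rw [if_neg (by simp [hext])]
        rw [hps1]
        simp [pvScanPrefixes_single]
      · -- parent is neither "" nor "/ext": A adds it and steps to join ps
        rw [pvAWhile, dif_pos ⟨hPne, hext⟩]
        simp only [pvBFold, List.foldl_cons]
        have hinit :
            (if PySem.Chars.join ['/'] ps ++ '/' :: q ≠ [] ∧
                PySem.Chars.join ['/'] ps ++ '/' :: q ≠ ['/', 'e', 'x', 't'] then
              PySem.Set.add d (String.ofList (PySem.Chars.join ['/'] ps ++ '/' :: q))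
            else d) =
            PySem.Set.add d (String.ofList (PySem.Chars.join ['/'] ps ++ '/' :: q)) :=
          if_pos ⟨hPne, hext⟩
        rw [hinit]
        cases hLcase : PySem.Chars.join ['/'] ps with
        | nil =>
          -- join ps = "": ps = [[]]; A's next parent is "" and the loop stops
          simp only [List.nil_append]
          have hnm : '/' ∉ ('/' :: q).drop 1 := by simpa using hq
          rw [if_neg hnm, pvAWhile]
          simp only [ne_eq, not_true_eq_false, false_and, dite_false]
          rw [pvJoin_eq_nil ps hpsne hLcase]
          simp [pvScanPrefixes_single]
        | cons c L' =>
          -- join ps ≠ "": A's next parent is exactly join ps (drop the last component)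
          have hmem : '/' ∈ ((c :: L') ++ '/' :: q).drop 1 := by
            simp only [List.cons_append, List.drop_succ_cons, List.drop_zero]
            exact List.mem_append_right _ (List.mem_cons_self)
          rw [if_pos hmem]
          have hrs : pvRsplitHead ((c :: L') ++ '/' :: q) = c :: L' := by
            have hcontains : ((c :: L') ++ '/' :: q).contains '/' = true := by
              simp
            simp only [pvRsplitHead, hcontains, if_pos]
            rw [List.reverse_append, List.reverse_cons]
            rw [List.dropWhile_append]
            have hqrev : (('/' :: q).reverse.dropWhile (fun c => decide (c ≠ '/'))).isEmpty = false := by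
              simp only [List.isEmpty_eq_false_iff, ne_eq, List.dropWhile_eq_nil_iff]
              intro hall
              have := hall '/' (by simp)
              simp at this
            rw [if_neg (by simp [hqrev])]
            have hdw : List.dropWhile (fun c => decide (c ≠ '/')) (q.reverse ++ ['/']) = ['/'] := by
              rw [List.dropWhile_append]
              rw [if_pos (by
                simp only [List.isEmpty_iff, List.dropWhile_eq_nil_iff]
                intro x hx
                simp only [decide_eq_true_eq, ne_eq]
                intro hxx
                exact hq (hxx ▸ (List.mem_reverse.mp hx)))]
              simp
            rw [hdw]
            simp
          rw [hrs, ← hLcase]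
          rw [ih hsf' hpsne]
          rfl

-- lift pvChain to the per-remote step functions of the two ports
theorem pvStep_eq (d : PySem.Set String) (remote : String) :
    pvAWhile d (pvRsplitHead remote.toList) = pvBAdd d remote := by
  set cs := pvRsplitHead remote.toList with hcs
  have hsplit : PySem.Chars.splitOn cs ['/'] = pvSplit cs := pvSplitOn_eq cs
  have hjoin : PySem.Chars.join ['/'] (pvSplit cs) = cs := pvSplit_join cs
  unfold pvBAdd
  rw [← hcs, hsplit]
  have := pvChain (pvSplit cs) (pvSplit_slashfree cs) (pvSplit_ne_nil cs) d
  rw [hjoin] at this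
  exact this

-- ===== VERDICT (by name: the statement is the Claim_ definition above) =====
theorem collect_required_dirs_spec : Claim_equal_collect_required_dirs := by
  intro uploads _
  unfold Spec_collect_required_dirs collect_required_dirs collect_required_dirs_alt
  congr 1
  apply PySem.List.foldl_congr_mem
  intro acc lr _
  exact pvStep_eq acc lr.2
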